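-- pv_equiv track=rewrite | github.com/rummanalirakib/Predictive-Modeling-for-Code-Review-Question-Intent-Classification | Task4.py | QuestionDevider
-- ===== SOURCE A (Python) =====
-- def QuestionDevider(text):
--     question = []
--     sentence = ""
--     index=0
--     for i in range(0, len(text)):
--         if text[i] == '.':
--             if i-1>0 and i-2>0 and text[i-1]=='s' and text[i-2]=='v':
--                 continue
--             sentence = ""
--         elif text[i] == '?':
--             sentence += "?"
--             question.insert(index, sentence)
--             sentence=""
--             index+=1
--         else:
--             sentence+=text[i]
--     return question
-- ===== SOURCE B (Python) =====
-- def QuestionDevider(text):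
--     question = []
--     start = 0
--     for i, ch in enumerate(text):
--         if ch == '?':
--             question.append(''.join(c for c in text[start:i] if c != '.') + '?')
--             start = i + 1
--         elif ch == '.' and not (i > 2 and text[i-1] == 's' and text[i-2] == 'v'):
--             start = i + 1
--     return question
-- ===== Notes on version B (the rewrite author's own statement) =====
-- stated objective: faster
-- what changed: Replaces the character-accumulator state machine (building each sentence one character at a time with an explicit insert index) with a boundary-index scan: only the start index of the current segment is kept between boundaries, and each question is produced by slicing the text once and filtering out the skipped abbreviation periods.
import Mathlib
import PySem

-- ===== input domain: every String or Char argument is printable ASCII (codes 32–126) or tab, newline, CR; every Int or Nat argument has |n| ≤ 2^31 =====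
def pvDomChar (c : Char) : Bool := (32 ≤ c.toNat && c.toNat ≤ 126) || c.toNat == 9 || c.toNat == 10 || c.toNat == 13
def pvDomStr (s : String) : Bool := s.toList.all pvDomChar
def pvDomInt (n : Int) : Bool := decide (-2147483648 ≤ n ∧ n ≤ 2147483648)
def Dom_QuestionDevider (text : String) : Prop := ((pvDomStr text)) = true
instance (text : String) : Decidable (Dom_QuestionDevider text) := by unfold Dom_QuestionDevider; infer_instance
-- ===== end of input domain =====

-- B replaces A's char-by-char accumulator state machine with a boundary-index scan that
-- slices each question out of the text; objective: simpler (same O(n) cost).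

-- ===== PORT A =====
-- A's loop body: state (question, sentence, index); sentence kept as List Char, turned
-- into a String exactly where Python inserts it into the list.
def pvStepA (cs : List Char) (st : List String × List Char × Int) (i : Int) :
    List String × List Char × Int :=
  let c := PySem.List.pyGetD cs i ' '
  if c = '.' then
    if i - 1 > 0 ∧ i - 2 > 0 ∧ PySem.List.pyGetD cs (i - 1) ' ' = 's' ∧
        PySem.List.pyGetD cs (i - 2) ' ' = 'v' then
      st
    else (st.1, [], st.2.2)
  else if c = '?' then
    (PySem.List.insert st.1 st.2.2 (String.ofList (st.2.1 ++ ['?'])), [], st.2.2 + 1)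
  else (st.1, st.2.1 ++ [c], st.2.2)

def QuestionDevider (text : String) : List String :=
  let cs := text.toList
  ((PySem.List.pyRange 0 (PySem.List.len cs) 1).foldl (pvStepA cs) ([], [], 0)).1

-- ===== PORT B =====
-- B's loop body: state (question, start); on a terminator, slice cs[start:i], filter, append.
def pvStepB (cs : List Char) (st : List String × Int) (p : Int × Char) :
    List String × Int :=
  if p.2 = '?' then
    (st.1 ++ [String.ofList (((PySem.List.slice cs (some st.2) (some p.1)).filter (· != '.')) ++ ['?'])],
     p.1 + 1)
  else if p.2 = '.' ∧ ¬ (p.1 > 2 ∧ PySem.List.pyGetD cs (p.1 - 1) ' ' = 's' ∧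
      PySem.List.pyGetD cs (p.1 - 2) ' ' = 'v') then
    (st.1, p.1 + 1)
  else st

def QuestionDevider_alt (text : String) : List String :=
  let cs := text.toList
  ((PySem.List.enumerate cs).foldl (pvStepB cs) ([], 0)).1

-- ===== PRECONDITION & SPEC =====
def Spec_QuestionDevider (text : String) (out : List String) : Prop := out = QuestionDevider_alt text
instance (text : String) (out : List String) : Decidable (Spec_QuestionDevider text out) := by unfold Spec_QuestionDevider; infer_instance

-- ===== CLAIM (what is proved, stated in full; the proofs are below) =====
def Claim_equal_QuestionDevider : Prop := ∀ (text : String), Dom_QuestionDevider text → Spec_QuestionDevider text (QuestionDevider text)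

-- ===== LEMMAS AND PROOFS =====

-- Invariant: at position k, A's sentence is the '.'-filtered slice cs[st:k] and A's index
-- is the length of the accumulated question list; then both folds yield the same questions.
lemma pv_key (cs : List Char) :
    ∀ m k st q, cs.length - k = m → k ≤ cs.length → st ≤ k →
    ((PySem.List.pyRange (k : Int) ((cs.length : Int)) 1).foldl (pvStepA cs)
        (q, ((cs.drop st).take (k - st)).filter (· != '.'), (q.length : Int))).1
    = ((PySem.List.enumerate (cs.drop k) (k : Int)).foldl (pvStepB cs) (q, (st : Int))).1 := by
  intro m
  induction m with
  | zero =>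
    intro k st q hm hk hst
    have hkl : k = cs.length := by omega
    subst hkl
    rw [PySem.List.pyRange_one_eq_nil (le_refl _), List.drop_length,
      PySem.List.enumerate_nil]
    rfl
  | succ n ih =>
    intro k st q hm hk hst
    have hklt : k < cs.length := by omega
    have hdrop : cs.drop k = cs[k] :: cs.drop (k + 1) := (List.getElem_cons_drop hklt).symm
    rw [PySem.List.pyRange_one_cons (by exact_mod_cast hklt), hdrop,
      PySem.List.enumerate_cons, List.foldl_cons, List.foldl_cons]
    have htake : (cs.drop st).take (k + 1 - st) = (cs.drop st).take (k - st) ++ [cs[k]] := by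
      rw [show k + 1 - st = (k - st) + 1 by omega, List.take_add_one, List.getElem?_drop,
        show st + (k - st) = k by omega, List.getElem?_eq_getElem hklt]
      rfl
    have hget : PySem.List.pyGetD cs (k : Int) ' ' = cs[k] := by
      rw [PySem.List.pyGetD_natCast, List.getD_eq_getElem _ _ hklt]
    have hcast1 : ((k : Int) + 1) = ((k + 1 : Nat) : Int) := by push_cast; ring
    by_cases hdot : cs[k] = '.'
    · by_cases hg : PySem.List.pyGetD cs ((k : Int) - 1) ' ' = 's' ∧
          PySem.List.pyGetD cs ((k : Int) - 2) ' ' = 'v' ∧ (k : Int) > 2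
      · -- skipped abbreviation period: both sides keep their state
        have hA : pvStepA cs (q, ((cs.drop st).take (k - st)).filter (· != '.'),
            (q.length : Int)) (k : Int)
            = (q, ((cs.drop st).take (k - st)).filter (· != '.'), (q.length : Int)) := by
          simp only [pvStepA, hget]
          rw [if_pos hdot, if_pos ⟨by omega, by omega, hg.1, hg.2.1⟩]
        have hB : pvStepB cs (q, (st : Int)) ((k : Int), cs[k]) = (q, (st : Int)) := by
          simp only [pvStepB]
          rw [if_neg (by simp [hdot]), if_neg (fun h => h.2 ⟨hg.2.2, hg.1, hg.2.1⟩)]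
        rw [hA, hB]
        have := ih (k + 1) st q (by omega) (by omega) (by omega)
        rwa [htake, List.filter_append, show [cs[k]].filter (· != '.') = [] by simp [hdot],
          List.append_nil] at this
      · -- resetting period: sentence cleared / start moved past k
        have hA : pvStepA cs (q, ((cs.drop st).take (k - st)).filter (· != '.'),
            (q.length : Int)) (k : Int) = (q, [], (q.length : Int)) := by
          simp only [pvStepA, hget]
          rw [if_pos hdot, if_neg (by intro h; exact hg ⟨h.2.2.1, h.2.2.2, by omega⟩)]
        have hB : pvStepB cs (q, (st : Int)) ((k : Int), cs[k]) = (q, (k : Int) + 1) := by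
          simp only [pvStepB]
          rw [if_neg (by simp [hdot]), if_pos ⟨hdot, by intro h; exact hg ⟨h.2.1, h.2.2, h.1⟩⟩]
        rw [hA, hB, hcast1]
        have := ih (k + 1) (k + 1) q (by omega) (by omega) (by omega)
        simpa using this
    · -- not a period: a terminator or an ordinary character
      by_cases hq : cs[k] = '?'
      · have hA : pvStepA cs (q, ((cs.drop st).take (k - st)).filter (· != '.'),
            (q.length : Int)) (k : Int)
            = (q ++ [String.ofList ((((cs.drop st).take (k - st)).filter (· != '.')) ++ ['?'])],
               [], (q.length : Int) + 1) := by
          simp only [pvStepA, hget]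
          rw [if_neg (by simp [hq]), if_pos hq]
          rw [show ((q.length : Int)) = PySem.List.len q by simp [PySem.List.len_eq],
            PySem.List.insert_len]
        have hB : pvStepB cs (q, (st : Int)) ((k : Int), cs[k])
            = (q ++ [String.ofList ((((cs.drop st).take (k - st)).filter (· != '.')) ++ ['?'])],
               (k : Int) + 1) := by
          simp only [pvStepB]
          rw [if_pos hq, PySem.List.slice_natCast]
        rw [hA, hB, hcast1]
        have := ih (k + 1) (k + 1)
          (q ++ [String.ofList ((((cs.drop st).take (k - st)).filter (· != '.')) ++ ['?'])])
          (by omega) (by omega) (by omega)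
        simp only [List.length_append, List.length_cons, List.length_nil] at this ⊢
        rw [show (((q.length + (0 + 1)) : Nat) : Int) = (q.length : Int) + 1 by push_cast; ring] at this
        simpa using this
      · -- ordinary character: appended to the sentence / start unchanged
        have hA : pvStepA cs (q, ((cs.drop st).take (k - st)).filter (· != '.'),
            (q.length : Int)) (k : Int)
            = (q, (((cs.drop st).take (k - st)).filter (· != '.')) ++ [cs[k]],
               (q.length : Int)) := by
          simp only [pvStepA, hget]
          rw [if_neg (by simp [hdot]), if_neg (by simp [hq])]
        have hB : pvStepB cs (q, (st : Int)) ((k : Int), cs[k]) = (q, (st : Int)) := by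
          simp only [pvStepB]
          rw [if_neg (by simp [hq]), if_neg (by simp [hdot])]
        rw [hA, hB]
        have := ih (k + 1) st q (by omega) (by omega) (by omega)
        rwa [htake, List.filter_append,
          show [cs[k]].filter (· != '.') = [cs[k]] by simp [hdot]] at this

-- ===== VERDICT (by name: the statement is the Claim_ definition above) =====
theorem QuestionDevider_spec : Claim_equal_QuestionDevider := by
  intro text _
  unfold Spec_QuestionDevider QuestionDevider QuestionDevider_alt
  simp only [PySem.List.len_eq]
  have h := pv_key text.toList text.toList.length 0 0 [] rfl (by omega) (by omega)
  simpa using h
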